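-- pv_equiv track=rewrite | github.com/starBURST72/pythontasks | sum.py | sum_odd_even_digits
-- ===== SOURCE A (Python) =====
-- def sum_odd_even_digits(n):
--     odd_sum = 0
--     even_sum = 0
--
--     while n > 0:
--         digit = n % 10
--         if digit % 2 == 0:
--             even_sum += digit
--         else:
--             odd_sum += digit
--         n //= 10
--
--     return odd_sum, even_sum
-- ===== SOURCE B (Python) =====
-- def sum_odd_even_digits(n):
--     odd_sum = 0
--     even_sum = 0
--     for ch in (str(n) if n > 0 else ""):
--         d = int(ch)
--         if d % 2 == 0:
--             even_sum += d
--         else: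
--             odd_sum += d
--     return odd_sum, even_sum
-- ===== Notes on version B (the rewrite author's own statement) =====
-- stated objective: idiomatic
-- what changed: B obtains the digits from str(n) and scans them most-significant-first instead of extracting them least-significant-first by repeated division and remainder.
import Mathlib
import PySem

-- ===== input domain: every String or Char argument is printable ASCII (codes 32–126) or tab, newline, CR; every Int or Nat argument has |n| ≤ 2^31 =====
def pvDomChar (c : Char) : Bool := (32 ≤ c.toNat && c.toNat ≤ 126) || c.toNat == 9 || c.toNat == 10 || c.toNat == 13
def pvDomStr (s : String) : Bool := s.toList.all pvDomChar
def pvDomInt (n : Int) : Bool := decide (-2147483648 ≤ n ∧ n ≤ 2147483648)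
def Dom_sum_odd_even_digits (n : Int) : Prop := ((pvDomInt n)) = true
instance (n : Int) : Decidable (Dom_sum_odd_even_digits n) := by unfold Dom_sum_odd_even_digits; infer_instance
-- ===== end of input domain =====

-- B obtains the digits from str(n) (most-significant-first) instead of extracting them
-- least-significant-first by repeated division and remainder; same cost, more idiomatic.


-- ===== PORT A =====
-- termination helper for the while loop (cited by decreasing_by)
theorem pv_fdiv10_toNat_lt (n : Int) (_h : 0 < n) : (PySem.Int.floordiv n 10).toNat < n.toNat := by
  simp only [PySem.Int.floordiv]
  rw [Int.fdiv_eq_ediv, if_pos (Or.inl (by norm_num))]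
  omega

-- the while loop of A, state (odd_sum, even_sum, n)
def sumLoopA (odd_sum even_sum n : Int) : Int × Int :=
  if h : 0 < n then
    let digit := PySem.Int.mod n 10
    if PySem.Int.mod digit 2 = 0 then
      sumLoopA odd_sum (even_sum + digit) (PySem.Int.floordiv n 10)
    else
      sumLoopA (odd_sum + digit) even_sum (PySem.Int.floordiv n 10)
  else (odd_sum, even_sum)
termination_by n.toNat
decreasing_by all_goals exact pv_fdiv10_toNat_lt n h

def sum_odd_even_digits (n : Int) : Int × Int := sumLoopA 0 0 n

-- ===== PORT B =====
-- int(ch) ported as PySem.Int.ofChars? [ch]; every ch here is a decimal digit so the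
-- conversion never fails and the .getD 0 default is never used.
def sum_odd_even_digits_alt (n : Int) : Int × Int :=
  (if 0 < n then (PySem.Int.toStr n).toList else []).foldl
    (fun p ch =>
      let d : Int := (PySem.Int.ofChars? [ch]).getD 0
      if PySem.Int.mod d 2 = 0 then (p.1, p.2 + d) else (p.1 + d, p.2))
    (0, 0)

-- ===== PRECONDITION & SPEC =====
def Spec_sum_odd_even_digits (n : Int) (out : Int × Int) : Prop := out = sum_odd_even_digits_alt n
instance (n : Int) (out : Int × Int) : Decidable (Spec_sum_odd_even_digits n out) := by unfold Spec_sum_odd_even_digits; infer_instance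

-- ===== CLAIM (what is proved, stated in full; the proofs are below) =====
def Claim_equal_sum_odd_even_digits : Prop := ∀ (n : Int), Dom_sum_odd_even_digits n → Spec_sum_odd_even_digits n (sum_odd_even_digits n)

-- ===== LEMMAS AND PROOFS =====

theorem pv_fdiv_ten (a : Int) : Int.fdiv a 10 = a / 10 := by
  rw [Int.fdiv_eq_ediv, if_pos (Or.inl (by norm_num))]; ring

theorem pv_fmod_nonneg (a b : Int) (hb : 0 ≤ b) : Int.fmod a b = a % b := by
  rw [Int.fmod_eq_emod, if_pos (Or.inl hb)]; ring

-- sums of the odd / even digits of a Nat digit list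
def pvOdd (l : List Nat) : Int := ((l.filter (fun d => d % 2 == 1)).sum : Nat)
def pvEven (l : List Nat) : Int := ((l.filter (fun d => d % 2 == 0)).sum : Nat)

theorem pvOdd_cons (d : Nat) (l : List Nat) :
    pvOdd (d :: l) = (if d % 2 = 1 then (d : Int) else 0) + pvOdd l := by
  simp only [pvOdd, List.filter_cons]
  by_cases h : d % 2 = 1 <;> simp [h]

theorem pvEven_cons (d : Nat) (l : List Nat) :
    pvEven (d :: l) = (if d % 2 = 0 then (d : Int) else 0) + pvEven l := by
  simp only [pvEven, List.filter_cons]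
  by_cases h : d % 2 = 0 <;> simp [h]

-- A's loop computes the odd/even digit sums of n.toNat's decimal digits
theorem sumLoopA_eq (m : Nat) : ∀ (a b : Int), 0 < m →
    sumLoopA a b (m : Int) = (a + pvOdd (Nat.digits 10 m), b + pvEven (Nat.digits 10 m)) := by
  induction m using Nat.strong_induction_on with
  | _ m ih =>
    intro a b hm
    rw [sumLoopA]
    have hpos : (0 : Int) < (m : Int) := by exact_mod_cast hm
    simp only [hpos, dif_pos]
    have hmod : PySem.Int.mod (m : Int) 10 = ((m % 10 : Nat) : Int) := by
      simp only [PySem.Int.mod]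
      rw [pv_fmod_nonneg _ _ (by norm_num)]
      omega
    have hdiv : PySem.Int.floordiv (m : Int) 10 = ((m / 10 : Nat) : Int) := by
      simp only [PySem.Int.floordiv, pv_fdiv_ten]
      omega
    have hmod2 : PySem.Int.mod ((m % 10 : Nat) : Int) 2 = (((m % 10) % 2 : Nat) : Int) := by
      simp only [PySem.Int.mod]
      rw [pv_fmod_nonneg _ _ (by norm_num)]
      omega
    have hdig : Nat.digits 10 m = m % 10 :: Nat.digits 10 (m / 10) :=
      Nat.digits_def' (by norm_num) hm
    rw [hmod, hdiv, hmod2, hdig, pvOdd_cons, pvEven_cons]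
    by_cases hq : m / 10 = 0
    · rw [hq]
      by_cases he : m % 10 % 2 = 0
      · have hc : ((m % 10 % 2 : Nat) : Int) = 0 := by exact_mod_cast he
        have h1 : ¬ m % 10 % 2 = 1 := by omega
        rw [if_pos hc, sumLoopA]
        simp [pvOdd, pvEven, he]
      · have hc : ¬ ((m % 10 % 2 : Nat) : Int) = 0 := by exact_mod_cast he
        have h1 : m % 10 % 2 = 1 := by omega
        rw [if_neg hc, sumLoopA]
        simp [pvOdd, pvEven, h1]
    · have hlt : m / 10 < m := Nat.div_lt_self hm (by norm_num)
      have hq' : 0 < m / 10 := Nat.pos_of_ne_zero hq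
      by_cases he : m % 10 % 2 = 0
      · have : ((m % 10 % 2 : Nat) : Int) = 0 := by exact_mod_cast he
        rw [if_pos this, ih _ hlt _ _ hq']
        have h1 : ¬ m % 10 % 2 = 1 := by omega
        simp only [if_neg h1, if_pos he, Prod.mk.injEq]
        constructor <;> ring
      · have : ¬ ((m % 10 % 2 : Nat) : Int) = 0 := by exact_mod_cast he
        rw [if_neg this, ih _ hlt _ _ hq']
        have h1 : m % 10 % 2 = 1 := by omega
        simp only [if_pos h1, if_neg he, Prod.mk.injEq]
        constructor <;> ring

-- single-digit characters convert back to their value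
theorem pv_ofChars_digitChar (d : Nat) (h : d < 10) :
    (PySem.Int.ofChars? [Nat.digitChar d]).getD 0 = (d : Int) := by
  interval_cases d <;> decide

-- B's fold step
theorem pv_foldB (l : List Nat) : (∀ d ∈ l, d < 10) → ∀ (a b : Int),
    ((l.map Nat.digitChar).reverse).foldl
      (fun p ch =>
        let d : Int := (PySem.Int.ofChars? [ch]).getD 0
        if PySem.Int.mod d 2 = 0 then (p.1, p.2 + d) else (p.1 + d, p.2))
      (a, b) = (a + pvOdd l, b + pvEven l) := by
  induction l with
  | nil => intro _ a b; simp [pvOdd, pvEven]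
  | cons d l ih =>
    intro hlt a b
    have hd : d < 10 := hlt d (List.mem_cons_self ..)
    simp only [List.map_cons, List.reverse_cons, List.foldl_append, List.foldl_cons,
      List.foldl_nil]
    rw [ih (fun x hx => hlt x (List.mem_cons_of_mem _ hx)) a b]
    simp only [pv_ofChars_digitChar d hd]
    have hmod2 : PySem.Int.mod (d : Int) 2 = ((d % 2 : Nat) : Int) := by
      simp only [PySem.Int.mod]
      rw [pv_fmod_nonneg _ _ (by norm_num)]
      omega
    rw [hmod2, pvOdd_cons, pvEven_cons]
    by_cases he : d % 2 = 0
    · have hc : ((d % 2 : Nat) : Int) = 0 := by exact_mod_cast he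
      have h1 : ¬ d % 2 = 1 := by omega
      simp only [if_pos hc, if_pos he, if_neg h1, Prod.mk.injEq]
      constructor <;> ring
    · have hc : ¬ ((d % 2 : Nat) : Int) = 0 := by exact_mod_cast he
      have h1 : d % 2 = 1 := by omega
      simp only [if_neg hc, if_neg he, if_pos h1, Prod.mk.injEq]
      constructor <;> ring

-- Nat.toDigits is the reversed digitChar image of Nat.digits (for positive input)
theorem pv_toDigitsCore_eq (f : Nat) : ∀ (m : Nat) (l : List Char), 0 < m → m < f →
    Nat.toDigitsCore 10 f m l = ((Nat.digits 10 m).map Nat.digitChar).reverse ++ l := by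
  induction f with
  | zero => intro m l hm hf; omega
  | succ f ih =>
    intro m l hm hf
    rw [Nat.toDigitsCore]
    have hdig : Nat.digits 10 m = m % 10 :: Nat.digits 10 (m / 10) :=
      Nat.digits_def' (by norm_num) hm
    by_cases hq : m / 10 = 0
    · simp only [hq]
      rw [hdig, hq]
      simp
    · simp only [hq]
      have hlt : m / 10 < m := Nat.div_lt_self hm (by norm_num)
      rw [ih (m / 10) _ (Nat.pos_of_ne_zero hq) (by omega), hdig]
      simp

theorem pv_toDigits_eq (m : Nat) (hm : 0 < m) :
    Nat.toDigits 10 m = ((Nat.digits 10 m).map Nat.digitChar).reverse := by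
  rw [Nat.toDigits, pv_toDigitsCore_eq (m + 1) m [] hm (by omega)]
  simp

-- ===== VERDICT (by name: the statement is the Claim_ definition above) =====
theorem sum_odd_even_digits_spec : Claim_equal_sum_odd_even_digits := by
  intro n _
  unfold Spec_sum_odd_even_digits sum_odd_even_digits sum_odd_even_digits_alt
  by_cases h : 0 < n
  · have hm : 0 < n.toNat := by omega
    have hn : ((n.toNat : Nat) : Int) = n := by omega
    rw [if_pos h, PySem.Int.toList_toStr]
    have htc : PySem.Int.toChars n = Nat.toDigits 10 n.toNat := by
      simp [PySem.Int.toChars, not_lt.mpr (le_of_lt h)]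
    rw [htc, pv_toDigits_eq n.toNat hm,
      pv_foldB (Nat.digits 10 n.toNat) (fun d hd => Nat.digits_lt_base (by norm_num) hd) 0 0,
      ← hn, sumLoopA_eq n.toNat 0 0 hm]
    simp only [Int.toNat_natCast]
  · rw [if_neg h, sumLoopA]
    simp [h]
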